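-- pv_equiv track=rewrite | github.com/Rustemhak/Unstructured-field-data-aggregator | testing/testing.py | get_modifed
-- ===== SOURCE A (Python) =====
-- def get_modifed(string: str, language: str):
--     """Возвращает модифицированную строку. Приводит строку к английским буквам."""
--     eq = {
--         'o': 'о', 'e': 'е',
--         'c': 'с', 'p': 'р',
--         'O': 'О', 'E': 'Е',
--         'C': 'С', 'P': 'Р'
--     }
--     if string:
--         for en, ru in eq.items():
--             if language == 'en':
--                 string = string.replace(ru, en)
--             elif language == 'ru':
--                 string = string.replace(en, ru)
--             else:
--                 raise AttributeError(f"attribute language expected 'ru' or 'en', but got {language}")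
--
--         return string
--     return None
-- ===== SOURCE B (Python) =====
-- def get_modifed(string: str, language: str):
--     if string:
--         if language == 'en':
--             table = {'о': 'o', 'е': 'e', 'с': 'c', 'р': 'p',
--                      'О': 'O', 'Е': 'E', 'С': 'C', 'Р': 'P'}
--         elif language == 'ru':
--             table = {'o': 'о', 'e': 'е', 'c': 'с', 'p': 'р',
--                      'O': 'О', 'E': 'Е', 'C': 'С', 'P': 'Р'}
--         else:
--             raise AttributeError(f"attribute language expected 'ru' or 'en', but got {language}")
--         return ''.join(table.get(ch, ch) for ch in string)
--     return None
-- ===== Notes on version B (the rewrite author's own statement) =====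
-- stated objective: alternative
-- what changed: B validates the language once, builds a char-to-char lookup table, and rewrites the string in a single character-level pass with a dict lookup, instead of A's eight sequential full-string replace passes (with the language re-checked in each iteration).
import Mathlib
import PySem

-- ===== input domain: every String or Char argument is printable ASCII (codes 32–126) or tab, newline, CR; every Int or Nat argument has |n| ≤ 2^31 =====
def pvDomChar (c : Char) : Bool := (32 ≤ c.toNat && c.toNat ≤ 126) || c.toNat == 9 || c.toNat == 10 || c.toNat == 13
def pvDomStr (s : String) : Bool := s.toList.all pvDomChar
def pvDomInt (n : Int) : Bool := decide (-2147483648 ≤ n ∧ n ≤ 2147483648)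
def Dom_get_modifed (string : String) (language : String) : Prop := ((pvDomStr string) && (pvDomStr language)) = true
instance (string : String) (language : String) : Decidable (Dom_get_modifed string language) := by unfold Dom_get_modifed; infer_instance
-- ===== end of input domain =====

-- B replaces A's eight sequential full-string replace passes by one language check, a
-- char-to-char lookup table and a single character-level pass (alternative decomposition, not faster).


-- ===== PORT A =====
-- the dict eq = {'o':'о', …} of A, in insertion order
def eqItemsA : List (Char × Char) :=
  [('o','о'),('e','е'),('c','с'),('p','р'),('O','О'),('E','Е'),('C','С'),('P','Р')]

-- the `for en, ru in eq.items():` loop; the `raise AttributeError` branch ports to none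
def loopA : List (Char × Char) → String → String → Option String
  | [], s, _ => some s
  | (en, ru) :: rest, s, lang =>
      if lang == "en" then
        loopA rest (PySem.Str.replace s (String.ofList [ru]) (String.ofList [en])) lang
      else if lang == "ru" then
        loopA rest (PySem.Str.replace s (String.ofList [en]) (String.ofList [ru])) lang
      else none

def get_modifed (string : String) (language : String) : Option String :=
  if string.isEmpty then none else loopA eqItemsA string language

-- ===== PORT B =====
def tableEnB : PySem.Dict Char Char :=
  ⟨[('о','o'),('е','e'),('с','c'),('р','p'),('О','O'),('Е','E'),('С','C'),('Р','P')]⟩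
def tableRuB : PySem.Dict Char Char :=
  ⟨[('o','о'),('e','е'),('c','с'),('p','р'),('O','О'),('E','Е'),('C','С'),('P','Р')]⟩

def get_modifed_alt (string : String) (language : String) : Option String :=
  if string.isEmpty then none
  else if language == "en" then
    some (String.ofList (string.toList.map (fun ch => PySem.Dict.getD tableEnB ch ch)))
  else if language == "ru" then
    some (String.ofList (string.toList.map (fun ch => PySem.Dict.getD tableRuB ch ch)))
  else none  -- raise AttributeError

-- ===== PRECONDITION & SPEC =====
-- Pre_ excludes exactly the inputs on which A raises AttributeError (a nonempty string with a
-- language other than 'en'/'ru'); A returns on every input Pre_ admits.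
def Pre_get_modifed (string : String) (language : String) : Prop :=
  string = "" ∨ language = "en" ∨ language = "ru"
instance (string : String) (language : String) : Decidable (Pre_get_modifed string language) := by
  unfold Pre_get_modifed; infer_instance

def pvWitness_get_modifed : String × String := ("hello pOceC", "ru")

def Spec_get_modifed (string : String) (language : String) (out : Option String) : Prop :=
  out = get_modifed_alt string language
instance (string : String) (language : String) (out : Option String) : Decidable (Spec_get_modifed string language out) := by
  unfold Spec_get_modifed; infer_instance

-- ===== CLAIM (what is proved, stated in full; the proofs are below) =====
def Claim_equal_get_modifed : Prop := ∀ (string : String) (language : String),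
  Dom_get_modifed string language → Pre_get_modifed string language →
  Spec_get_modifed string language (get_modifed string language)

-- ===== LEMMAS AND PROOFS =====

-- single-char substitution as a pointwise function
def subst (o n c : Char) : Char := if c = o then n else c

theorem replace_go_single (o n : Char) (fuel : Nat) :
    ∀ (l acc : List Char), l.length ≤ fuel →
    PySem.Chars.replace.go [o] [n] fuel l acc = acc.reverse ++ l.map (subst o n) := by
  induction fuel with
  | zero =>
      intro l acc h
      have : l = [] := List.eq_nil_of_length_eq_zero (Nat.le_zero.mp h)
      subst this; simp [PySem.Chars.replace.go]
  | succ f ih =>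
      intro l acc h
      cases l with
      | nil => simp [PySem.Chars.replace.go]
      | cons c t =>
          have ht : t.length ≤ f := by simp at h; omega
          by_cases hc : c = o
          · subst hc
            have hp : List.isPrefixOf [c] (c :: t) = true := by
              simp [List.isPrefixOf]
            rw [PySem.Chars.replace.go]
            simp only [hp, if_pos, List.length_cons, List.length_nil, List.drop_succ_cons,
                       List.drop_zero]
            rw [ih t ([n].reverse ++ acc) ht]
            simp [subst]
          · have hp : List.isPrefixOf [o] (c :: t) = false := by
              simp [List.isPrefixOf]; intro h'; exact absurd h'.symm hc
            rw [PySem.Chars.replace.go]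
            simp only [hp, Bool.false_eq_true, if_false]
            rw [ih t (c :: acc) ht]
            simp [subst, hc]

theorem replace_single (s : List Char) (o n : Char) :
    PySem.Chars.replace s [o] [n] = s.map (subst o n) := by
  rw [PySem.Chars.replace, if_neg (by simp)]
  exact replace_go_single o n s.length s [] (le_refl _)

theorem str_replace_single (s : String) (o n : Char) :
    (PySem.Str.replace s (String.ofList [o]) (String.ofList [n])).toList
      = s.toList.map (subst o n) := by
  rw [PySem.Str.toList_replace]
  simp [replace_single]

theorem beq_false_of_ne_symm (c k : Char) (h : ¬ c = k) : (k == c) = false := by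
  simp only [beq_eq_false_iff_ne]; exact fun hh => h hh.symm

-- pointwise: the eight ru-direction substitutions compose to the tableRuB lookup
theorem chain_ru (c : Char) :
    subst 'P' 'Р' (subst 'C' 'С' (subst 'E' 'Е' (subst 'O' 'О'
      (subst 'p' 'р' (subst 'c' 'с' (subst 'e' 'е' (subst 'o' 'о' c)))))))
      = PySem.Dict.getD tableRuB c c := by
  by_cases h1 : c = 'o'; · subst h1; decide
  by_cases h2 : c = 'e'; · subst h2; decide
  by_cases h3 : c = 'c'; · subst h3; decide
  by_cases h4 : c = 'p'; · subst h4; decide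
  by_cases h5 : c = 'O'; · subst h5; decide
  by_cases h6 : c = 'E'; · subst h6; decide
  by_cases h7 : c = 'C'; · subst h7; decide
  by_cases h8 : c = 'P'; · subst h8; decide
  simp [subst, h1, h2, h3, h4, h5, h6, h7, h8,
        PySem.Dict.getD, PySem.Dict.get?, tableRuB, List.find?,
        beq_false_of_ne_symm c _ h1, beq_false_of_ne_symm c _ h2,
        beq_false_of_ne_symm c _ h3, beq_false_of_ne_symm c _ h4,
        beq_false_of_ne_symm c _ h5, beq_false_of_ne_symm c _ h6,
        beq_false_of_ne_symm c _ h7, beq_false_of_ne_symm c _ h8]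

-- an ASCII-domain char is left alone by the en-direction chain and by the en table
theorem chain_en (c : Char) (hc : pvDomChar c = true) :
    subst 'Р' 'P' (subst 'С' 'C' (subst 'Е' 'E' (subst 'О' 'O'
      (subst 'р' 'p' (subst 'с' 'c' (subst 'е' 'e' (subst 'о' 'o' c)))))))
      = PySem.Dict.getD tableEnB c c := by
  have hle : c.toNat ≤ 126 := by
    unfold pvDomChar at hc
    simp only [Bool.or_eq_true, Bool.and_eq_true, decide_eq_true_eq, beq_iff_eq] at hc
    rcases hc with ((⟨_, h⟩ | h) | h) | h <;> omega
  have ne : ∀ k : Char, 1000 ≤ k.toNat → ¬ c = k := by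
    intro k hk h; rw [h] at hle; omega
  simp [subst,
        ne _ (by decide : 1000 ≤ ('о' : Char).toNat),
        ne _ (by decide : 1000 ≤ ('е' : Char).toNat),
        ne _ (by decide : 1000 ≤ ('с' : Char).toNat),
        ne _ (by decide : 1000 ≤ ('р' : Char).toNat),
        ne _ (by decide : 1000 ≤ ('О' : Char).toNat),
        ne _ (by decide : 1000 ≤ ('Е' : Char).toNat),
        ne _ (by decide : 1000 ≤ ('С' : Char).toNat),
        ne _ (by decide : 1000 ≤ ('Р' : Char).toNat),
        PySem.Dict.getD, PySem.Dict.get?, tableEnB, List.find?,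
        beq_false_of_ne_symm c _ (ne _ (by decide : 1000 ≤ ('о' : Char).toNat)),
        beq_false_of_ne_symm c _ (ne _ (by decide : 1000 ≤ ('е' : Char).toNat)),
        beq_false_of_ne_symm c _ (ne _ (by decide : 1000 ≤ ('с' : Char).toNat)),
        beq_false_of_ne_symm c _ (ne _ (by decide : 1000 ≤ ('р' : Char).toNat)),
        beq_false_of_ne_symm c _ (ne _ (by decide : 1000 ≤ ('О' : Char).toNat)),
        beq_false_of_ne_symm c _ (ne _ (by decide : 1000 ≤ ('Е' : Char).toNat)),
        beq_false_of_ne_symm c _ (ne _ (by decide : 1000 ≤ ('С' : Char).toNat)),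
        beq_false_of_ne_symm c _ (ne _ (by decide : 1000 ≤ ('Р' : Char).toNat))]

-- ===== VERDICT (by name: the statement is the Claim_ definition above) =====
theorem get_modifed_spec : Claim_equal_get_modifed := by
  intro s lang hdom _hpre
  unfold Spec_get_modifed
  by_cases hs : s.isEmpty
  · simp [get_modifed, get_modifed_alt, hs]
  · have hdoms : ∀ c ∈ s.toList, pvDomChar c = true := by
      have := (Bool.and_eq_true _ _).mp hdom |>.1
      simpa [pvDomStr, List.all_eq_true] using this
    by_cases hen : lang = "en"
    · subst hen
      simp only [get_modifed, get_modifed_alt, hs, if_false, loopA, eqItemsA,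
                 if_pos, beq_self_eq_true, Bool.false_eq_true]
      have hkey : (PySem.Str.replace (PySem.Str.replace (PySem.Str.replace (PySem.Str.replace
            (PySem.Str.replace (PySem.Str.replace (PySem.Str.replace (PySem.Str.replace s
              (String.ofList ['о']) (String.ofList ['o']))
              (String.ofList ['е']) (String.ofList ['e']))
              (String.ofList ['с']) (String.ofList ['c']))
              (String.ofList ['р']) (String.ofList ['p']))
              (String.ofList ['О']) (String.ofList ['O']))
              (String.ofList ['Е']) (String.ofList ['E']))
              (String.ofList ['С']) (String.ofList ['C']))
              (String.ofList ['Р']) (String.ofList ['P'])).toList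
          = s.toList.map (fun ch => PySem.Dict.getD tableEnB ch ch) := by
        rw [str_replace_single, str_replace_single, str_replace_single, str_replace_single,
            str_replace_single, str_replace_single, str_replace_single, str_replace_single]
        simp only [List.map_map]
        refine List.map_congr_left ?_
        intro c hcm
        simpa [Function.comp] using chain_en c (hdoms c hcm)
      rw [Option.some.injEq, ← String.toList_inj, hkey, String.toList_ofList]
    · by_cases hru : lang = "ru"
      · subst hru
        simp only [get_modifed, get_modifed_alt, hs, if_false, loopA, eqItemsA,
                   if_pos, beq_self_eq_true, Bool.false_eq_true,
                   (by decide : (("ru" : String) == "en") = false)]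
        have hkey : (PySem.Str.replace (PySem.Str.replace (PySem.Str.replace (PySem.Str.replace
              (PySem.Str.replace (PySem.Str.replace (PySem.Str.replace (PySem.Str.replace s
                (String.ofList ['o']) (String.ofList ['о']))
                (String.ofList ['e']) (String.ofList ['е']))
                (String.ofList ['c']) (String.ofList ['с']))
                (String.ofList ['p']) (String.ofList ['р']))
                (String.ofList ['O']) (String.ofList ['О']))
                (String.ofList ['E']) (String.ofList ['Е']))
                (String.ofList ['C']) (String.ofList ['С']))
                (String.ofList ['P']) (String.ofList ['Р'])).toList
            = s.toList.map (fun ch => PySem.Dict.getD tableRuB ch ch) := by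
          rw [str_replace_single, str_replace_single, str_replace_single, str_replace_single,
              str_replace_single, str_replace_single, str_replace_single, str_replace_single]
          simp only [List.map_map]
          refine List.map_congr_left ?_
          intro c _
          simpa [Function.comp] using chain_ru c
        rw [Option.some.injEq, ← String.toList_inj, hkey, String.toList_ofList]
      · have he : (lang == "en") = false := by simp only [beq_eq_false_iff_ne]; exact hen
        have hr : (lang == "ru") = false := by simp only [beq_eq_false_iff_ne]; exact hru
        simp [get_modifed, get_modifed_alt, hs, loopA, eqItemsA, he, hr]
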